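-- pv_equiv track=rewrite | github.com/lrobinot/dotfiles | plugins/filter/list.py | list_insert_after
-- ===== SOURCE A (Python) =====
-- def list_insert_after(inStr, value, after):
--     l = inStr.strip('][').split(', ')
--     length = len(l)
--     for i in range(length):
--         if l[i] == "'" + value + "'":
--             del l[i]
--             break
--     length = len(l)
--     for i in range(length):
--         if l[i] == "'" + after + "'":
--             l.insert(i + 1, "'" + value + "'")
--             break
--     return "[" + ", ".join(l) + "]"
-- ===== SOURCE B (Python) =====
-- def list_insert_after(inStr, value, after):
--     toks = inStr.strip('][').split(', ')
--     v = "'" + value + "'"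
--     a = "'" + after + "'"
--     out = []
--     removed = False
--     inserted = False
--     for tok in toks:
--         if not removed and tok == v:
--             removed = True
--             continue
--         out.append(tok)
--         if not inserted and tok == a:
--             out.append(v)
--             inserted = True
--     return "[" + ", ".join(out) + "]"
-- ===== Notes on version B (the rewrite author's own statement) =====
-- stated objective: simpler
-- what changed: Replaces A's two index-based mutation scans (del then insert on the token list) with a single construction pass carrying removed/inserted flags.
import Mathlib
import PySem

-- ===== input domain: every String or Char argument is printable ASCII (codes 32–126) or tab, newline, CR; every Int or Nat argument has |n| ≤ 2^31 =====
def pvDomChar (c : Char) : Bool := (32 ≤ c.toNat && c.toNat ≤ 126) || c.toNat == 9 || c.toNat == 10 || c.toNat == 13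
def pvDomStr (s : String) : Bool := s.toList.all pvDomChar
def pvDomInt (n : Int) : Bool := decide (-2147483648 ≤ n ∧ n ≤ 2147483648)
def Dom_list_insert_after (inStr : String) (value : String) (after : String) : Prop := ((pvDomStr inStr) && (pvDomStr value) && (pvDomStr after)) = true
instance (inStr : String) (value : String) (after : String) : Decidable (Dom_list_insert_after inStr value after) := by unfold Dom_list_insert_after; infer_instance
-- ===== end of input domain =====

-- B replaces A's two index-based mutation scans (del, then insert) on the token list
-- with a single construction pass carrying removed/inserted flags (objective: simpler).

-- ===== PORT A =====
-- 'for i in range(len(l)): if l[i] == v: del l[i]; break' — delete the first matching token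
def pvRemoveFirst (v : String) : List String → List String
  | [] => []
  | x :: xs => if x == v then xs else x :: pvRemoveFirst v xs

-- 'for i in range(len(l)): if l[i] == a: l.insert(i+1, v); break' — insert v after the first a-token
def pvInsertAfterFirst (a : String) (v : String) : List String → List String
  | [] => []
  | x :: xs => if x == a then x :: v :: xs else x :: pvInsertAfterFirst a v xs

def list_insert_after (inStr : String) (value : String) (after : String) : String :=
  let l := (PySem.Chars.splitOn (PySem.Str.stripChars inStr "][").toList ", ".toList).map String.ofList  -- s.split(', '), sep nonempty: Chars.splitOn is the exact form
  let l := pvRemoveFirst ("'" ++ value ++ "'") l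
  let l := pvInsertAfterFirst ("'" ++ after ++ "'") ("'" ++ value ++ "'") l
  "[" ++ PySem.Str.join ", " l ++ "]"

-- ===== PORT B =====
-- one pass over the tokens with removed/inserted flags (Source B's loop)
def pvOnePass (v : String) (a : String) : List String → Bool → Bool → List String
  | [], _, _ => []
  | x :: xs, removed, inserted =>
    if !removed && x == v then pvOnePass v a xs true inserted
    else
      x :: (if !inserted && x == a then v :: pvOnePass v a xs removed true
            else pvOnePass v a xs removed inserted)

def list_insert_after_alt (inStr : String) (value : String) (after : String) : String :=
  let toks := (PySem.Chars.splitOn (PySem.Str.stripChars inStr "][").toList ", ".toList).map String.ofList  -- s.split(', '), sep nonempty: Chars.splitOn is the exact form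
  let v := "'" ++ value ++ "'"
  let a := "'" ++ after ++ "'"
  "[" ++ PySem.Str.join ", " (pvOnePass v a toks false false) ++ "]"

-- ===== PRECONDITION & SPEC =====
def Spec_list_insert_after (inStr : String) (value : String) (after : String) (out : String) : Prop := out = list_insert_after_alt inStr value after
instance (inStr : String) (value : String) (after : String) (out : String) : Decidable (Spec_list_insert_after inStr value after out) := by unfold Spec_list_insert_after; infer_instance

-- ===== CLAIM (what is proved, stated in full; the proofs are below) =====
def Claim_equal_list_insert_after : Prop := ∀ (inStr : String) (value : String) (after : String), Dom_list_insert_after inStr value after → Spec_list_insert_after inStr value after (list_insert_after inStr value after)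

-- ===== LEMMAS AND PROOFS =====
theorem pvOnePass_tt_tt (v a : String) (l : List String) : pvOnePass v a l true true = l := by
  induction l with
  | nil => rfl
  | cons x xs ih => simp [pvOnePass, ih]

theorem pvOnePass_tt_ff (v a : String) (l : List String) :
    pvOnePass v a l true false = pvInsertAfterFirst a v l := by
  induction l with
  | nil => rfl
  | cons x xs ih =>
    by_cases h : x == a
    · simp [pvOnePass, pvInsertAfterFirst, h, pvOnePass_tt_tt]
    · simp [pvOnePass, pvInsertAfterFirst, h, ih]

theorem pvOnePass_ff_tt (v a : String) (l : List String) :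
    pvOnePass v a l false true = pvRemoveFirst v l := by
  induction l with
  | nil => rfl
  | cons x xs ih =>
    by_cases h : x == v
    · simp [pvOnePass, pvRemoveFirst, h, pvOnePass_tt_tt]
    · simp [pvOnePass, pvRemoveFirst, h, ih]

theorem pvOnePass_eq (v a : String) (l : List String) :
    pvOnePass v a l false false = pvInsertAfterFirst a v (pvRemoveFirst v l) := by
  induction l with
  | nil => rfl
  | cons x xs ih =>
    by_cases hv : x == v
    · simp [pvOnePass, pvRemoveFirst, hv, pvOnePass_tt_ff]
    · by_cases ha : x == a
      · simp [pvOnePass, pvRemoveFirst, pvInsertAfterFirst, hv, ha, pvOnePass_ff_tt]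
      · simp [pvOnePass, pvRemoveFirst, pvInsertAfterFirst, hv, ha, ih]

-- ===== VERDICT (by name: the statement is the Claim_ definition above) =====
theorem list_insert_after_spec : Claim_equal_list_insert_after := by
  intro inStr value after _
  unfold Spec_list_insert_after list_insert_after list_insert_after_alt
  simp [pvOnePass_eq]
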